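-- pv_equiv track=rewrite | github.com/pyapyapya/Problem-Solving-TIL | 프로그래머스/2/131127. 할인 행사/할인 행사.py | solution
-- ===== SOURCE A (Python) =====
-- from collections import deque
--
-- def solution(want, number, discount):
--     answer = 0
--
--     # want에 없는 것은 넣지 않고 패스한다.
--     # 만약 deque이 비었다면 채워준다.
--     # {want:number} 딕셔너리를 만들고, 모든 원소가 음수가 되면 카운트한다.
--     deq = deque()
--     s = set(want)
--     n_wants = sum(number)
--     for idx in range(0, len(discount)-n_wants+1):
--         if len(deq) == 0:
--             deq = deque(discount[idx:idx+n_wants])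
--         else:
--             deq.popleft()
--             deq.append(discount[idx+n_wants-1])
--
--         dic = dict(zip(want, number))
--         if len(set(deq) - s) > 0:
--             continue
--         cnt = 0
--         for item in deq:
--             if dic[item] > 0:
--                 dic[item] -= 1
--                 cnt += 1
--         if cnt == n_wants:
--             answer += 1
--
--     return answer
-- ===== SOURCE B (Python) =====
-- def solution(want, number, discount):
--     # Sliding window over discount with an incremental count map and a
--     # "bad"-key counter deciding each window without rescanning it.
--     target = dict(zip(want, number))
--     k = sum(number)
--     L = len(discount)
--     if k < 1 or k > L:
--         return 0
--     cap = {}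
--     for w, v in target.items():
--         cap[w] = max(v, 0)
--     counts = {}
--     bad = 0   # number of distinct items whose window count exceeds its cap
--     ans = 0
--     for i in range(L):
--         x = discount[i]
--         c = counts.get(x, 0)
--         if c == cap.get(x, 0):
--             bad += 1
--         counts[x] = c + 1
--         if i >= k:
--             y = discount[i - k]
--             cy = counts[y]
--             if cy == cap.get(y, 0) + 1:
--                 bad -= 1
--             counts[y] = cy - 1
--         if i >= k - 1 and bad == 0:
--             ans += 1
--     return ans
-- ===== Notes on version B (the rewrite author's own statement) =====
-- stated objective: alternative
-- what changed: Replaced A's per-index window rebuild (deque shift + fresh dict + full scan of every window) by a single sliding-window pass that maintains an incremental count map and a counter of over-capacity keys.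
-- outside the precondition, e.g. on solution(['a'], [0], ['b']): A returns 2, B returns 0; on solution(['a', 'b'], [2], ['b', 'c']): A returns 0, B returns 0
import Mathlib
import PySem

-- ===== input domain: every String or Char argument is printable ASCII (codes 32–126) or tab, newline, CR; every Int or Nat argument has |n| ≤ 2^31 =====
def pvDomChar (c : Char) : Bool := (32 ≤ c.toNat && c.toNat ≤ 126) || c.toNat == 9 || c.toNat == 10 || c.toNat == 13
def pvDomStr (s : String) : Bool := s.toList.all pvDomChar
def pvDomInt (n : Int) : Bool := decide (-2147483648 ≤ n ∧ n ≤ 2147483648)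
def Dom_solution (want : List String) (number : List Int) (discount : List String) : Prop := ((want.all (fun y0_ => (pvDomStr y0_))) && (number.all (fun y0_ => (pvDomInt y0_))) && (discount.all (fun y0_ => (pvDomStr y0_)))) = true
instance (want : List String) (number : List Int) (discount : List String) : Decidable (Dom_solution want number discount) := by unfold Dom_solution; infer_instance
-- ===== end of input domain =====

-- B replaces A's per-index window rebuild (deque shift + fresh dict + full window scan)
-- by one sliding-window pass with an incremental count map and an over-capacity counter
-- (objective: alternative algorithm, same exact results).

-- ===== PORT A =====
-- literal transliteration of Source A: deque as List String (popleft = tail, append = ++ [·]),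
-- dict(zip(want, number)) as an insert fold, set difference via PySem.Set.
-- dic[item] and discount[idx+n_wants-1] are in range on every input Pre_ admits
-- (KeyError/IndexError inputs are excluded by Pre_), so the total getD forms are used.
def solution (want : List String) (number : List Int) (discount : List String) : Int :=
  let s : PySem.Set String := PySem.Set.ofList want
  let nWants : Int := number.sum
  (((PySem.List.pyRange 0 (PySem.List.len discount - nWants + 1) 1).foldl
    (fun (st : List String × Int) (idx : Int) =>
      let deq : List String :=
        if st.1.length = 0 then
          PySem.List.slice discount (some idx) (some (idx + nWants))
        else
          st.1.tail ++ [PySem.List.pyGetD discount (idx + nWants - 1) ""]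
      let dic : PySem.Dict String Int :=
        (want.zip number).foldl (fun d p => d.insert p.1 p.2) PySem.Dict.empty
      if (PySem.Set.diff (PySem.Set.ofList deq) s).length > 0 then (deq, st.2)
      else
        let r := deq.foldl
          (fun (q : PySem.Dict String Int × Int) item =>
            if q.1.getD item 0 > 0 then (q.1.insert item (q.1.getD item 0 - 1), q.2 + 1)
            else q) (dic, 0)
        if r.2 = nWants then (deq, st.2 + 1) else (deq, st.2))
    ([], 0))).2

-- ===== PORT B =====
-- literal transliteration of Source B: one pass over discount, counts = window count map,
-- bad = number of distinct items whose window count exceeds its cap, ans accumulator.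
-- discount[i] and discount[i-k] are in range wherever evaluated (0 ≤ i < len, k ≤ i),
-- so the total pyGetD form is used.
def solution_alt (want : List String) (number : List Int) (discount : List String) : Int :=
  let target : PySem.Dict String Int :=
    (want.zip number).foldl (fun d p => d.insert p.1 p.2) PySem.Dict.empty
  let k : Int := number.sum
  let L : Int := PySem.List.len discount
  if k < 1 ∨ L < k then 0
  else
    let cap : PySem.Dict String Int :=
      target.items.foldl (fun d p => d.insert p.1 (max p.2 0)) PySem.Dict.empty
    (((PySem.List.pyRange 0 L 1).foldl
      (fun (st : PySem.Dict String Int × Int × Int) (i : Int) =>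
        let x := PySem.List.pyGetD discount i ""
        let c := st.1.getD x 0
        let bad1 := if c = cap.getD x 0 then st.2.1 + 1 else st.2.1
        let counts1 := st.1.insert x (c + 1)
        let p :=
          if k ≤ i then
            let y := PySem.List.pyGetD discount (i - k) ""
            let cy := counts1.getD y 0
            (counts1.insert y (cy - 1), if cy = cap.getD y 0 + 1 then bad1 - 1 else bad1)
          else (counts1, bad1)
        let ans := if k - 1 ≤ i ∧ p.2 = 0 then st.2.2 + 1 else st.2.2
        (p.1, p.2, ans))
      (PySem.Dict.empty, 0, 0))).2.2

-- ===== PRECONDITION & SPEC =====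
-- Pre_ excludes (i) inputs with sum(number) = 0, where A counts every index because each
-- "window" is empty — an accident of the implementation outside the problem's domain of
-- positive counts — and (ii) inputs where a want item beyond len(number) (dropped by
-- dict(zip)) occurs in discount, on which A can raise KeyError (where A happens to
-- return there, B agrees).
def Pre_solution (want : List String) (number : List Int) (discount : List String) : Prop :=
  number.sum ≠ 0 ∧ ∀ x ∈ discount, x ∈ want → x ∈ want.take number.length
instance (want : List String) (number : List Int) (discount : List String) : Decidable (Pre_solution want number discount) := by unfold Pre_solution; infer_instance
def pvWitness_solution : List String × List Int × List String :=
  (["a", "b"], [1, 2], ["a", "b", "b", "a", "c"])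

def Spec_solution (want : List String) (number : List Int) (discount : List String) (out : Int) : Prop := out = solution_alt want number discount
instance (want : List String) (number : List Int) (discount : List String) (out : Int) : Decidable (Spec_solution want number discount out) := by unfold Spec_solution; infer_instance

-- ===== CLAIM (what is proved, stated in full; the proofs are below) =====
def Claim_equal_solution : Prop := ∀ (want : List String) (number : List Int) (discount : List String), Dom_solution want number discount → Pre_solution want number discount → Spec_solution want number discount (solution want number discount)

-- ===== LEMMAS AND PROOFS =====

-- dict(zip(want, number)), as both ports build it
def dicWN (want : List String) (number : List Int) : PySem.Dict String Int :=
  (want.zip number).foldl (fun d p => d.insert p.1 p.2) PySem.Dict.empty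

-- the per-item capacity both programs compare window counts against:
-- max(dict(zip(want, number)).get(x, 0), 0)
def capF (want : List String) (number : List Int) (x : String) : Int :=
  max ((dicWN want number).getD x 0) 0

-- a window is counted iff no item occurs more often than its capacity
def goodW (want : List String) (number : List Int) (w : List String) : Bool :=
  w.all (fun x => decide ((w.count x : Int) ≤ capF want number x))

-- distinct items of w whose count exceeds their capacity
def badOf (want : List String) (number : List Int) (w : List String) : Nat :=
  (PySem.Set.ofList w).countP (fun x => decide (capF want number x < (w.count x : Int)))

-- the window of length kN starting at j
def winAt (discount : List String) (kN j : Nat) : List String :=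
  (discount.drop j).take kN

-- A's loop body, by name (definitionally the lambda inside `solution`)
def stepA (want : List String) (number : List Int) (discount : List String)
    (st : List String × Int) (idx : Int) : List String × Int :=
  let deq : List String :=
    if st.1.length = 0 then
      PySem.List.slice discount (some idx) (some (idx + number.sum))
    else
      st.1.tail ++ [PySem.List.pyGetD discount (idx + number.sum - 1) ""]
  let dic : PySem.Dict String Int :=
    (want.zip number).foldl (fun d p => d.insert p.1 p.2) PySem.Dict.empty
  if (PySem.Set.diff (PySem.Set.ofList deq) (PySem.Set.ofList want)).length > 0 then (deq, st.2)
  else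
    let r := deq.foldl
      (fun (q : PySem.Dict String Int × Int) item =>
        if q.1.getD item 0 > 0 then (q.1.insert item (q.1.getD item 0 - 1), q.2 + 1)
        else q) (dic, 0)
    if r.2 = number.sum then (deq, st.2 + 1) else (deq, st.2)

lemma solution_eq (want : List String) (number : List Int) (discount : List String) :
    solution want number discount
      = (((PySem.List.pyRange 0 (PySem.List.len discount - number.sum + 1) 1).foldl
          (stepA want number discount) ([], 0))).2 := rfl

-- B's cap dict, by name
def capD (want : List String) (number : List Int) : PySem.Dict String Int :=
  (dicWN want number).items.foldl (fun d p => d.insert p.1 (max p.2 0)) PySem.Dict.empty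

-- B's loop body, by name (definitionally the lambda inside `solution_alt`)
def stepB (want : List String) (number : List Int) (discount : List String)
    (st : PySem.Dict String Int × Int × Int) (i : Int) : PySem.Dict String Int × Int × Int :=
  let x := PySem.List.pyGetD discount i ""
  let c := st.1.getD x 0
  let bad1 := if c = (capD want number).getD x 0 then st.2.1 + 1 else st.2.1
  let counts1 := st.1.insert x (c + 1)
  let p :=
    if number.sum ≤ i then
      let y := PySem.List.pyGetD discount (i - number.sum) ""
      let cy := counts1.getD y 0
      (counts1.insert y (cy - 1), if cy = (capD want number).getD y 0 + 1 then bad1 - 1 else bad1)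
    else (counts1, bad1)
  let ans := if number.sum - 1 ≤ i ∧ p.2 = 0 then st.2.2 + 1 else st.2.2
  (p.1, p.2, ans)

lemma solution_alt_eq (want : List String) (number : List Int) (discount : List String) :
    solution_alt want number discount
      = if number.sum < 1 ∨ PySem.List.len discount < number.sum then 0
        else (((PySem.List.pyRange 0 (PySem.List.len discount) 1).foldl
          (stepB want number discount) (PySem.Dict.empty, 0, 0))).2.2 := rfl

lemma capF_nonneg (want : List String) (number : List Int) (x : String) :
    0 ≤ capF want number x := le_max_right _ _

lemma dicWN_getD_not_mem (want : List String) (number : List Int) (x : String)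
    (hx : x ∉ want) : (dicWN want number).getD x 0 = 0 := by
  apply PySem.Dict.getD_of_not_contains
  rw [Bool.eq_false_iff]
  intro hc
  rw [PySem.Dict.contains_iff_mem_keys] at hc
  have hkeys : (dicWN want number).keys
      = PySem.Set.update (PySem.Dict.empty : PySem.Dict String Int).keys
          ((want.zip number).map Prod.fst) :=
    PySem.Dict.keys_foldl_insert_key (want.zip number) Prod.fst (fun _ p => p.2) _
  rw [hkeys] at hc
  rcases (PySem.Set.mem_update _ _ _).1 hc with h | h
  · simp [PySem.Dict.keys_empty] at h
  · rcases List.mem_map.1 h with ⟨p, hp, hpx⟩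
    exact hx (hpx ▸ (List.of_mem_zip hp).1)

lemma capF_of_not_mem (want : List String) (number : List Int) (x : String)
    (hx : x ∉ want) : capF want number x = 0 := by
  simp [capF, dicWN_getD_not_mem want number x hx]

lemma capD_getD (want : List String) (number : List Int) (x : String) :
    (capD want number).getD x 0 = capF want number x := by
  have hnd : (dicWN want number).keys.Nodup :=
    PySem.Dict.nodup_keys_foldl_insert_key (want.zip number) Prod.fst
      (fun _ p => p.2) (PySem.Dict.empty : PySem.Dict String Int)
      (PySem.Dict.nodup_keys_empty)
  have hfresh : ∀ p ∈ (dicWN want number).items,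
      (PySem.Dict.empty : PySem.Dict String Int).contains p.1 = false := by
    intro p _; simp [PySem.Dict.contains_empty]
  have hmapnd : ((dicWN want number).items.map Prod.fst).Nodup := hnd
  have hitems : (capD want number).items
      = (PySem.Dict.empty : PySem.Dict String Int).items
        ++ (dicWN want number).items.map (fun p => (p.1, max p.2 0)) := by
    exact PySem.Dict.items_foldl_insert_fresh (dicWN want number).items Prod.fst
      (fun p => max p.2 0) _ hfresh hmapnd
  have hcapkeys : (capD want number).keys = (dicWN want number).keys := by
    show (capD want number).items.map Prod.fst = (dicWN want number).items.map Prod.fst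
    have he : (PySem.Dict.empty : PySem.Dict String Int).items = [] := rfl
    rw [hitems, List.map_append, List.map_map, he]
    rfl
  by_cases hmem : x ∈ (dicWN want number).keys
  · rcases List.mem_map.1 hmem with ⟨p, hp, hpx⟩
    have hget : (dicWN want number).getD x 0 = p.2 := by
      have : (x, p.2) ∈ (dicWN want number).items := by
        rw [← hpx]; exact hp
      exact PySem.Dict.getD_of_mem_items _ this hnd 0
    have hcapmem : (x, max p.2 0) ∈ (capD want number).items := by
      rw [hitems]
      have : (PySem.Dict.empty : PySem.Dict String Int).items = [] := rfl
      rw [this, List.nil_append, List.mem_map]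
      exact ⟨p, hp, by rw [← hpx]⟩
    have hcapnd : (capD want number).keys.Nodup := by rw [hcapkeys]; exact hnd
    rw [PySem.Dict.getD_of_mem_items _ hcapmem hcapnd 0, capF, hget]
  · have h1 : (dicWN want number).contains x = false := by
      rw [Bool.eq_false_iff]; intro hc
      exact hmem ((PySem.Dict.contains_iff_mem_keys _ _).1 hc)
    have h2 : (capD want number).contains x = false := by
      rw [Bool.eq_false_iff]; intro hc
      exact hmem (hcapkeys ▸ (PySem.Dict.contains_iff_mem_keys _ _).1 hc)
    rw [PySem.Dict.getD_of_not_contains _ 0 h2, capF,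
      PySem.Dict.getD_of_not_contains _ 0 h1]
    simp

lemma goodW_iff (want : List String) (number : List Int) (w : List String) :
    goodW want number w = true ↔ ∀ x, (w.count x : Int) ≤ capF want number x := by
  constructor
  · intro h x
    by_cases hx : x ∈ w
    · have := (List.all_eq_true.1 h) x hx
      simpa using this
    · rw [List.count_eq_zero_of_not_mem hx]
      exact_mod_cast capF_nonneg want number x
  · intro h
    exact List.all_eq_true.2 fun x _ => by simpa using h x

lemma badOf_perm (want : List String) (number : List Int) {w w' : List String}
    (h : w.Perm w') : badOf want number w = badOf want number w' := by
  unfold badOf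
  have hperm : (PySem.Set.ofList w).Perm (PySem.Set.ofList w') := by
    refine (List.perm_ext_iff_of_nodup (PySem.Set.nodup_ofList w)
      (PySem.Set.nodup_ofList w')).2 ?_
    intro a
    rw [PySem.Set.mem_ofList _ _, PySem.Set.mem_ofList _ _]
    exact h.mem_iff
  rw [hperm.countP_eq]
  apply List.countP_congr
  intro x _
  rw [h.count_eq]

lemma countP_update_point {α : Type} [DecidableEq α] (s : List α) (p q : α → Bool) (x : α)
    (hx : x ∈ s) (hnd : s.Nodup) (h : ∀ z ∈ s, z ≠ x → p z = q z) :
    s.countP p + (if q x then 1 else 0) = s.countP q + (if p x then 1 else 0) := by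
  induction s with
  | nil => cases hx
  | cons a t ih =>
    rcases List.nodup_cons.1 hnd with ⟨hat, hndt⟩
    rcases List.mem_cons.1 hx with rfl | hxt
    · have ht : t.countP p = t.countP q := by
        apply List.countP_congr
        intro z hz
        rw [h z (List.mem_cons_of_mem _ hz) (fun hzx => hat (hzx ▸ hz))]
      simp only [List.countP_cons, ht]
      by_cases hp : p x <;> by_cases hq : q x <;> simp [hp, hq] <;> omega
    · have hax : a ≠ x := fun he => hat (he ▸ hxt)
      have hpa : p a = q a := h a List.mem_cons_self hax
      have := ih hxt hndt (fun z hz hzx => h z (List.mem_cons_of_mem _ hz) hzx)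
      simp only [List.countP_cons, hpa]
      by_cases hq : q a <;> simp [hq] <;> omega

lemma badOf_append (want : List String) (number : List Int) (w : List String) (x : String) :
    badOf want number (w ++ [x])
      = badOf want number w + (if (w.count x : Int) = capF want number x then 1 else 0) := by
  classical
  unfold badOf
  have hcnt : ∀ z : String, (w ++ [x]).count z = w.count z + (if x = z then 1 else 0) := by
    intro z; simp [List.count_append, List.count_singleton]
  have hofl : PySem.Set.ofList (w ++ [x]) = PySem.Set.add (PySem.Set.ofList w) x :=
    PySem.Set.ofList_append_singleton w x
  by_cases hx : x ∈ w
  · have hxs : x ∈ PySem.Set.ofList w := (PySem.Set.mem_ofList _ _).2 hx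
    rw [hofl, PySem.Set.add_of_mem hxs]
    have key := countP_update_point (PySem.Set.ofList w)
      (fun z => decide (capF want number z < ((w ++ [x]).count z : Int)))
      (fun z => decide (capF want number z < (w.count z : Int)))
      x hxs (PySem.Set.nodup_ofList w) ?_
    · have hx1 : ((w ++ [x]).count x : Int) = (w.count x : Int) + 1 := by
        rw [hcnt x]; simp
      rcases lt_trichotomy ((w.count x : Int)) (capF want number x) with hlt | heq | hgt
      · have h1 : decide (capF want number x < ((w ++ [x]).count x : Int)) = false ∨
            (capF want number x < ((w ++ [x]).count x : Int)) ∨ True := Or.inr (Or.inr trivial)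
        simp only [hx1] at key
        rw [if_neg (by omega)]
        by_cases hc : capF want number x < (w.count x : Int) + 1
        · omega
        · simp only [decide_eq_true_eq] at key
          rw [if_neg hc, if_neg (by omega)] at key
          omega
      · rw [if_pos heq]
        simp only [decide_eq_true_eq, hx1] at key
        rw [if_neg (by omega), if_pos (by omega)] at key
        omega
      · rw [if_neg (by omega)]
        simp only [decide_eq_true_eq, hx1] at key
        rw [if_pos (by omega), if_pos (by omega)] at key
        omega
    · intro z hz hzx
      simp only [decide_eq_true_eq]
      rw [hcnt z, if_neg (fun he => hzx he.symm)]
      simp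
  · have hxs : x ∉ PySem.Set.ofList w := fun hc => hx ((PySem.Set.mem_ofList _ _).1 hc)
    rw [hofl, PySem.Set.add_of_not_mem hxs, List.countP_append]
    have h0 : w.count x = 0 := List.count_eq_zero_of_not_mem hx
    have hc1 : ((w ++ [x]).count x : Int) = 1 := by rw [hcnt x]; simp [h0]
    have hcongr : (PySem.Set.ofList w).countP
        (fun z => decide (capF want number z < ((w ++ [x]).count z : Int)))
        = (PySem.Set.ofList w).countP
          (fun z => decide (capF want number z < (w.count z : Int))) := by
      apply List.countP_congr
      intro z hz
      have hzx : x ≠ z := fun he => hxs (he ▸ hz)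
      simp only [decide_eq_true_eq]
      rw [hcnt z, if_neg hzx]
      simp
    rw [hcongr]
    have hcap := capF_nonneg want number x
    simp only [List.countP_cons, List.countP_nil, decide_eq_true_eq, hc1, h0]
    by_cases hc : capF want number x < 1
    · rw [if_pos hc, if_pos (by omega)]
    · rw [if_neg hc, if_neg (by omega)]

lemma badOf_cons (want : List String) (number : List Int) (t : List String) (y : String) :
    badOf want number (y :: t)
      = badOf want number t + (if (t.count y : Int) = capF want number y then 1 else 0) := by
  rw [badOf_perm want number (List.perm_append_singleton y t).symm, badOf_append]

lemma badOf_eq_zero_iff (want : List String) (number : List Int) (w : List String) :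
    badOf want number w = 0 ↔ goodW want number w = true := by
  unfold badOf goodW
  rw [List.countP_eq_zero, List.all_eq_true]
  constructor
  · intro h x hx
    have := h x ((PySem.Set.mem_ofList _ _).2 hx)
    simp only [decide_eq_true_eq] at this ⊢
    omega
  · intro h x hx
    have := h x ((PySem.Set.mem_ofList _ _).1 hx)
    simp only [decide_eq_true_eq] at this ⊢
    omega

-- A's inner loop over a window
def stepIn (q : PySem.Dict String Int × Int) (item : String) : PySem.Dict String Int × Int :=
  if q.1.getD item 0 > 0 then (q.1.insert item (q.1.getD item 0 - 1), q.2 + 1) else q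

lemma innerA (want : List String) (number : List Int) (w : List String) :
    (∀ x, (w.foldl stepIn (dicWN want number, 0)).1.getD x 0
        = (dicWN want number).getD x 0 - min ((w.count x : Int)) (capF want number x)) ∧
    ((w.foldl stepIn (dicWN want number, 0)).2 ≤ (w.length : Int)) ∧
    ((w.foldl stepIn (dicWN want number, 0)).2 = (w.length : Int)
      ↔ ∀ x, (w.count x : Int) ≤ capF want number x) := by
  induction w using List.reverseRecOn with
  | nil =>
    refine ⟨fun x => ?_, le_refl _, ?_⟩
    · have := capF_nonneg want number x
      simp only [List.foldl_nil, List.count_nil, Nat.cast_zero]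
      omega
    · simp only [List.foldl_nil, List.length_nil, List.count_nil, Nat.cast_zero]
      exact ⟨fun _ x => capF_nonneg want number x, fun _ => trivial⟩
  | append_singleton w item ih =>
    obtain ⟨ha, hb, hc⟩ := ih
    have hcnt : ∀ x : String, ((w ++ [item]).count x : Int)
        = (w.count x : Int) + (if x = item then 1 else 0) := by
      intro x
      by_cases hxi : x = item
      · subst hxi
        rw [if_pos rfl, List.count_append]
        simp
      · rw [if_neg hxi, List.count_append]
        simp [List.count_singleton]
        exact fun he => hxi he.symm
    have hcap0 : (0:Int) ≤ capF want number item := capF_nonneg want number item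
    have hcapg : capF want number item = max ((dicWN want number).getD item 0) 0 := rfl
    have hc0 : (0:Int) ≤ (w.count item : Int) := Int.natCast_nonneg _
    have hcond : ((w.foldl stepIn (dicWN want number, 0)).1.getD item 0 > 0)
        ↔ ((w.count item : Int) < capF want number item) := by
      rw [ha item, hcapg]
      omega
    rw [List.foldl_append, List.foldl_cons, List.foldl_nil]
    by_cases hgt : (w.foldl stepIn (dicWN want number, 0)).1.getD item 0 > 0
    · have hlt : (w.count item : Int) < capF want number item := hcond.1 hgt
      rw [stepIn, if_pos hgt]
      refine ⟨fun x => ?_, ?_, ?_⟩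
      · rw [PySem.Dict.getD_insert, hcnt x]
        by_cases hx : x = item
        · subst hx
          rw [if_pos rfl, if_pos rfl, ha x]
          omega
        · rw [if_neg hx, if_neg hx, ha x]
          ring_nf
      · simp only [List.length_append, List.length_cons, List.length_nil]
        push_cast
        omega
      · simp only [List.length_append, List.length_cons, List.length_nil]
        push_cast
        constructor
        · intro h x
          have h2 : (w.foldl stepIn (dicWN want number, 0)).2 = (w.length : Int) := by omega
          have := hc.1 h2 x
          rw [hcnt x]
          by_cases hx : x = item
          · subst hx; omega
          · rw [if_neg hx]; omega
        · intro h
          have : ∀ x, (w.count x : Int) ≤ capF want number x := by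
            intro x
            have := h x
            rw [hcnt x] at this
            split_ifs at this <;> omega
          have := hc.2 this
          omega
    · have hge : capF want number item ≤ (w.count item : Int) := by
        by_contra hcon
        exact hgt (hcond.2 (by omega))
      rw [stepIn, if_neg hgt]
      refine ⟨fun x => ?_, ?_, ?_⟩
      · rw [ha x, hcnt x]
        by_cases hx : x = item
        · subst hx
          rw [if_pos rfl]
          omega
        · rw [if_neg hx]
          ring_nf
      · simp only [List.length_append, List.length_cons, List.length_nil]
        push_cast
        omega
      · simp only [List.length_append, List.length_cons, List.length_nil]
        push_cast
        constructor
        · intro h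
          omega
        · intro h
          have := h item
          rw [hcnt item, if_pos rfl] at this
          omega

-- A's loop body decision on a full window
lemma decisionA (want : List String) (number : List Int) (discount : List String)
    (kN : Nat) (hsum : number.sum = (kN : Int)) (w : List String) (hlen : w.length = kN)
    (st : List String × Int) (idx : Int)
    (hdeq : (if st.1.length = 0 then
        PySem.List.slice discount (some idx) (some (idx + number.sum))
      else
        st.1.tail ++ [PySem.List.pyGetD discount (idx + number.sum - 1) ""]) = w) :
    stepA want number discount st idx
      = (w, st.2 + if goodW want number w then 1 else 0) := by
  unfold stepA
  rw [hdeq]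
  have hfold : w.foldl
      (fun (q : PySem.Dict String Int × Int) item =>
        if q.1.getD item 0 > 0 then (q.1.insert item (q.1.getD item 0 - 1), q.2 + 1)
        else q)
      ((want.zip number).foldl (fun d p => d.insert p.1 p.2) PySem.Dict.empty, 0)
      = w.foldl stepIn (dicWN want number, 0) := rfl
  by_cases hex : ∃ x ∈ w, x ∉ want
  · obtain ⟨x, hxw, hxnw⟩ := hex
    have hmemdiff : x ∈ PySem.Set.diff (PySem.Set.ofList w) (PySem.Set.ofList want) := by
      rw [PySem.Set.mem_diff]
      exact ⟨(PySem.Set.mem_ofList _ _).2 hxw,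
        fun hc => hxnw ((PySem.Set.mem_ofList _ _).1 hc)⟩
    rw [if_pos (List.length_pos_of_mem hmemdiff)]
    have hbad : goodW want number w = false := by
      rw [Bool.eq_false_iff]
      intro hg
      have := (goodW_iff want number w).1 hg x
      rw [capF_of_not_mem want number x hxnw] at this
      have hpos : 0 < w.count x := List.count_pos_iff.2 hxw
      omega
    rw [hbad]
    simp
  · push_neg at hex
    have hdiffnil : ¬ (PySem.Set.diff (PySem.Set.ofList w) (PySem.Set.ofList want)).length > 0 := by
      intro hlen
      obtain ⟨x, hx⟩ := List.exists_mem_of_length_pos hlen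
      rw [PySem.Set.mem_diff] at hx
      exact hx.2 ((PySem.Set.mem_ofList _ _).2 (hex x ((PySem.Set.mem_ofList _ _).1 hx.1)))
    rw [if_neg hdiffnil]
    simp only [hfold]
    obtain ⟨-, -, hc⟩ := innerA want number w
    have hlen' : (w.length : Int) = number.sum := by rw [hlen, hsum]
    by_cases hg : goodW want number w = true
    · have : (w.foldl stepIn (dicWN want number, 0)).2 = number.sum := by
        rw [← hlen']
        exact hc.2 ((goodW_iff want number w).1 hg)
      rw [if_pos this, hg, if_pos rfl]
    · have hne : ¬ (w.foldl stepIn (dicWN want number, 0)).2 = number.sum := by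
        intro heq
        exact hg ((goodW_iff want number w).2 (hc.1 (by rw [heq, hlen'])))
      rw [if_neg hne]
      rw [Bool.not_eq_true] at hg
      rw [hg]
      simp

lemma winAt_length (discount : List String) (kN j : Nat) (hj : j + kN ≤ discount.length) :
    (winAt discount kN j).length = kN := by
  simp [winAt]; omega

lemma winAt_shift (discount : List String) (kN a : Nat) (ha : 1 ≤ a)
    (haL : a + kN ≤ discount.length) (h : a + kN - 1 < discount.length)
    (hk1 : 1 ≤ kN) :
    (winAt discount kN (a - 1)).tail ++ [discount[a + kN - 1]] = winAt discount kN a := by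
  unfold winAt
  rw [← List.drop_one, List.drop_take, List.drop_drop]
  have h1 : a - 1 + 1 = a := by omega
  rw [h1]
  obtain ⟨kM, rfl⟩ : ∃ kM, kN = kM + 1 := ⟨kN - 1, by omega⟩
  have h2 : kM + 1 - 1 = kM := by omega
  rw [h2]
  have h3 : (discount.drop a)[kM]? = some discount[a + (kM + 1) - 1] := by
    rw [List.getElem?_drop]
    have hidx : a + kM < discount.length := by omega
    rw [List.getElem?_eq_getElem hidx]
    have h4 : a + (kM + 1) - 1 = a + kM := by omega
    simp [h4]
  rw [List.take_succ, h3]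
  rfl

-- A's whole loop
lemma loopA (want : List String) (number : List Int) (discount : List String)
    (kN T : Nat) (hk1 : 1 ≤ kN) (hsum : number.sum = (kN : Int))
    (hkL : kN + T = discount.length) :
    ∀ (cnt a : Nat), a + cnt = T + 1 →
    ∀ (deq : List String) (ans : Int),
    ((a = 0 ∧ deq = []) ∨ (1 ≤ a ∧ deq = winAt discount kN (a - 1))) →
    ((PySem.List.pyRange (a : Int) ((T : Int) + 1) 1).foldl (stepA want number discount) (deq, ans)).2
      = ans + (((PySem.List.pyRange (a : Int) ((T : Int) + 1) 1).countP
          (fun j => goodW want number (winAt discount kN j.toNat)) : Nat) : Int) := by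
  intro cnt
  induction cnt with
  | zero =>
    intro a ha deq ans _
    have hnil : PySem.List.pyRange (a : Int) ((T : Int) + 1) 1 = [] :=
      PySem.List.pyRange_one_eq_nil (by omega)
    rw [hnil]
    simp
  | succ cnt ih =>
    intro a ha deq ans hdeq
    have haT : a ≤ T := by omega
    have hcons : PySem.List.pyRange (a : Int) ((T : Int) + 1) 1
        = (a : Int) :: PySem.List.pyRange ((a : Int) + 1) ((T : Int) + 1) 1 :=
      PySem.List.pyRange_one_cons (by omega)
    have hwlen : (winAt discount kN a).length = kN := winAt_length _ _ _ (by omega)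
    have hdeq' : (if deq.length = 0 then
        PySem.List.slice discount (some (a : Int)) (some ((a : Int) + number.sum))
      else
        deq.tail ++ [PySem.List.pyGetD discount ((a : Int) + number.sum - 1) ""])
        = winAt discount kN a := by
      rcases hdeq with ⟨h0, rfl⟩ | ⟨h1, rfl⟩
      · subst h0
        have hnil : ([] : List String).length = 0 := rfl
        rw [if_pos hnil, hsum]
        exact PySem.List.slice_natCast_add discount 0 kN
      · have hlenprev : (winAt discount kN (a - 1)).length = kN :=
          winAt_length _ _ _ (by omega)
        rw [if_neg (by omega)]
        have hidx : (a : Int) + number.sum - 1 = ((a + kN - 1 : Nat) : Int) := by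
          rw [hsum]; push_cast; omega
        have hlt : a + kN - 1 < discount.length := by omega
        rw [hidx, PySem.List.pyGetD_natCast, List.getD_eq_getElem _ _ hlt]
        exact winAt_shift discount kN a h1 (by omega) hlt hk1
    have hstep : stepA want number discount (deq, ans) (a : Int)
        = (winAt discount kN a, ans + if goodW want number (winAt discount kN a) then 1 else 0) :=
      decisionA want number discount kN hsum (winAt discount kN a) hwlen (deq, ans) (a : Int) hdeq'
    have hcast : ((a : Int) + 1) = (((a + 1 : Nat)) : Int) := by push_cast; ring
    rw [hcons, List.foldl_cons, List.countP_cons, hstep, hcast]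
    rw [ih (a + 1) (by omega) _ _ (Or.inr ⟨by omega, by rw [Nat.add_sub_cancel]⟩)]
    have htn : ((a : Int)).toNat = a := Int.toNat_natCast a
    by_cases hg : goodW want number (winAt discount kN a) = true
    · simp [htn, hg]
      push_cast
      ring
    · rw [Bool.not_eq_true] at hg
      simp [htn, hg]

-- B's whole loop
lemma loopB (want : List String) (number : List Int) (discount : List String)
    (kN : Nat) (hk1 : 1 ≤ kN) (hsum : number.sum = (kN : Int))
    (hkL : kN ≤ discount.length) :
    ∀ (cnt m : Nat), m + cnt = discount.length →
    ∀ (counts : PySem.Dict String Int) (bad ans : Int),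
    (∀ x, counts.getD x 0 = (((discount.take m).drop (m - kN)).count x : Int)) →
    bad = (badOf want number ((discount.take m).drop (m - kN)) : Int) →
    ((PySem.List.pyRange (m : Int) ((discount.length : Int)) 1).foldl
        (stepB want number discount) (counts, bad, ans)).2.2
      = ans + (((PySem.List.pyRange (m : Int) ((discount.length : Int)) 1).countP
          (fun i => decide (kN ≤ i.toNat + 1)
            && goodW want number (winAt discount kN (i.toNat + 1 - kN))) : Nat) : Int) := by
  intro cnt
  induction cnt with
  | zero =>
    intro m hm counts bad ans _ _
    have hnil : PySem.List.pyRange (m : Int) ((discount.length : Int)) 1 = [] :=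
      PySem.List.pyRange_one_eq_nil (by omega)
    rw [hnil]
    simp
  | succ cnt ih =>
    intro m hm counts bad ans hc hb
    have hmL : m < discount.length := by omega
    have hcons : PySem.List.pyRange (m : Int) ((discount.length : Int)) 1
        = (m : Int) :: PySem.List.pyRange ((m : Int) + 1) ((discount.length : Int)) 1 :=
      PySem.List.pyRange_one_cons (by omega)
    have hcast : ((m : Int) + 1) = (((m + 1 : Nat)) : Int) := by push_cast; ring
    set w : List String := (discount.take m).drop (m - kN) with hwdef
    set x : String := discount[m] with hxdef
    have hx : PySem.List.pyGetD discount (m : Int) "" = x := by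
      rw [PySem.List.pyGetD_natCast, List.getD_eq_getElem _ _ hmL]
    have htake : discount.take (m + 1) = discount.take m ++ [x] := by
      rw [List.take_succ, List.getElem?_eq_getElem hmL]
      rfl
    have hmid : (discount.take (m + 1)).drop (m - kN) = w ++ [x] := by
      rw [htake, List.drop_append_of_le_length (by simp; omega)]
    set wnext : List String := (discount.take (m + 1)).drop (m + 1 - kN) with hwnextdef
    have hbad1 : (if counts.getD x 0 = (capD want number).getD x 0 then bad + 1 else bad)
        = (badOf want number (w ++ [x]) : Int) := by
      rw [hc x, capD_getD, badOf_append, hb]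
      by_cases hcc : ((w.count x : Int)) = capF want number x
      · rw [if_pos hcc, if_pos hcc]
        push_cast
        ring
      · rw [if_neg hcc, if_neg hcc]
        push_cast
        ring
    have hcounts1 : ∀ z, ((counts.insert x (counts.getD x 0 + 1)).getD z 0)
        = (((w ++ [x]).count z : Int)) := by
      intro z
      rw [PySem.Dict.getD_insert]
      by_cases hz : z = x
      · subst hz
        rw [if_pos rfl, hc x, List.count_append]
        have h1x : [x].count x = 1 := by simp
        rw [h1x]
        push_cast
        ring
      · have hxz : [x].count z = 0 := by
          rw [List.count_singleton]
          simp
          exact fun he => hz he.symm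
        rw [if_neg hz, hc z, List.count_append, hxz]
        simp
    rw [hcons, List.foldl_cons, List.countP_cons]
    have htnm : ((m : Int)).toNat = m := Int.toNat_natCast m
    by_cases hkm : kN ≤ m
    · -- removal branch taken
      have hcond : number.sum ≤ (m : Int) := by rw [hsum]; exact_mod_cast hkm
      set y : String := discount[m - kN] with hydef
      have hy : PySem.List.pyGetD discount ((m : Int) - number.sum) "" = y := by
        have hmk : (m : Int) - number.sum = ((m - kN : Nat) : Int) := by
          rw [hsum]; push_cast; omega
        rw [hmk, PySem.List.pyGetD_natCast, List.getD_eq_getElem _ _ (by omega)]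
      have hsplit : w ++ [x] = y :: wnext := by
        rw [← hmid, hwnextdef]
        have hlen1 : m - kN < (discount.take (m + 1)).length := by simp; omega
        rw [List.drop_eq_getElem_cons hlen1]
        congr 1
        · rw [List.getElem_take]
        · congr 1
          omega
      have hwinnext : wnext = winAt discount kN (m + 1 - kN) := by
        rw [hwnextdef, List.drop_take, winAt]
        congr 1
        omega
      have hcy : ((counts.insert x (counts.getD x 0 + 1)).getD y 0)
          = ((wnext.count y : Int)) + 1 := by
        rw [hcounts1 y, hsplit]
        rw [List.count_cons_self]
        push_cast
        ring
      have hbad2 : (if (counts.insert x (counts.getD x 0 + 1)).getD y 0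
            = (capD want number).getD y 0 + 1
          then (if counts.getD x 0 = (capD want number).getD x 0 then bad + 1 else bad) - 1
          else (if counts.getD x 0 = (capD want number).getD x 0 then bad + 1 else bad))
          = (badOf want number wnext : Int) := by
        rw [hcy, capD_getD, hbad1, hsplit, badOf_cons]
        by_cases hcc : ((wnext.count y : Int)) = capF want number y
        · rw [if_pos (by omega), if_pos hcc]
          push_cast
          ring
        · rw [if_neg (by omega), if_neg hcc]
          push_cast
          ring
      have hcounts2 : ∀ z, (((counts.insert x (counts.getD x 0 + 1)).insert y
            ((counts.insert x (counts.getD x 0 + 1)).getD y 0 - 1)).getD z 0)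
          = ((wnext.count z : Int)) := by
        intro z
        rw [PySem.Dict.getD_insert]
        by_cases hz : z = y
        · rw [if_pos hz, hz, hcy]
          ring
        · rw [if_neg hz, hcounts1 z, hsplit]
          norm_cast
          exact List.count_cons_of_ne (fun he => hz he.symm)
      have hstep : stepB want number discount (counts, bad, ans) (m : Int)
          = ((counts.insert x (counts.getD x 0 + 1)).insert y
              ((counts.insert x (counts.getD x 0 + 1)).getD y 0 - 1),
             (badOf want number wnext : Int),
             if number.sum - 1 ≤ (m : Int) ∧ (badOf want number wnext : Int) = 0
             then ans + 1 else ans) := by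
        simp only [stepB, hx, hy, if_pos hcond]
        rw [hbad2]
      rw [hstep, hcast]
      rw [ih (m + 1) (by omega) _ _ _ (fun z => hcounts2 z) rfl]
      have hgiff : ((badOf want number wnext : Int) = 0)
          ↔ goodW want number (winAt discount kN (m + 1 - kN)) = true := by
        rw [← hwinnext, ← badOf_eq_zero_iff]
        omega
      have hc1 : number.sum - 1 ≤ (m : Int) := by rw [hsum]; push_cast; omega
      by_cases hgood : goodW want number (winAt discount kN (m + 1 - kN)) = true
      · rw [if_pos ⟨hc1, hgiff.2 hgood⟩]
        have hpred : (decide (kN ≤ ((m : Int)).toNat + 1)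
            && goodW want number (winAt discount kN (((m : Int)).toNat + 1 - kN))) = true := by
          rw [htnm]
          simp only [hgood, Bool.and_true]
          simp
          omega
        rw [hpred]
        simp
        push_cast
        ring
      · rw [if_neg (fun hcc => hgood (hgiff.1 hcc.2))]
        rw [Bool.not_eq_true] at hgood
        have hpred : (decide (kN ≤ ((m : Int)).toNat + 1)
            && goodW want number (winAt discount kN (((m : Int)).toNat + 1 - kN))) = false := by
          rw [htnm]
          simp [hgood]
        rw [hpred]
        simp
    · -- no removal (window still growing)
      have hcond : ¬ number.sum ≤ (m : Int) := by rw [hsum]; push_cast; omega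
      have hwnext_eq : wnext = w ++ [x] := by
        rw [hwnextdef, ← hmid]
        congr 1
        omega
      have hstep : stepB want number discount (counts, bad, ans) (m : Int)
          = (counts.insert x (counts.getD x 0 + 1),
             (badOf want number wnext : Int),
             if number.sum - 1 ≤ (m : Int) ∧ (badOf want number wnext : Int) = 0
             then ans + 1 else ans) := by
        simp only [stepB, hx, if_neg hcond]
        rw [hbad1, hwnext_eq]
      rw [hstep, hcast]
      rw [ih (m + 1) (by omega) _ _ _ (fun z => by rw [← hwnext_eq] at hcounts1; exact hcounts1 z) rfl]
      by_cases hfin : kN ≤ m + 1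
      · have hwin : wnext = winAt discount kN (m + 1 - kN) := by
          rw [hwnextdef, List.drop_take, winAt]
          congr 1
          omega
        have hgiff : ((badOf want number wnext : Int) = 0)
            ↔ goodW want number (winAt discount kN (m + 1 - kN)) = true := by
          rw [← hwin, ← badOf_eq_zero_iff]
          omega
        have hc1 : number.sum - 1 ≤ (m : Int) := by rw [hsum]; push_cast; omega
        by_cases hgood : goodW want number (winAt discount kN (m + 1 - kN)) = true
        · rw [if_pos ⟨hc1, hgiff.2 hgood⟩]
          have hpred : (decide (kN ≤ ((m : Int)).toNat + 1)
              && goodW want number (winAt discount kN (((m : Int)).toNat + 1 - kN))) = true := by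
            rw [htnm]
            simp only [hgood, Bool.and_true]
            simp
            omega
          rw [hpred]
          simp
          push_cast
          ring
        · rw [if_neg (fun hcc => hgood (hgiff.1 hcc.2))]
          rw [Bool.not_eq_true] at hgood
          have hpred : (decide (kN ≤ ((m : Int)).toNat + 1)
              && goodW want number (winAt discount kN (((m : Int)).toNat + 1 - kN))) = false := by
            rw [htnm]
            simp [hgood]
          rw [hpred]
          simp
      · have hc1 : ¬ (number.sum - 1 ≤ (m : Int) ∧ (badOf want number wnext : Int) = 0) := by
          intro hcc
          have := hcc.1
          rw [hsum] at this
          push_cast at this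
          omega
        rw [if_neg hc1]
        have hpredf : (decide (kN ≤ ((m : Int)).toNat + 1)
            && goodW want number (winAt discount kN (((m : Int)).toNat + 1 - kN))) = false := by
          rw [htnm]
          simp [hfin]
        rw [hpredf]
        simp

-- re-indexing between B's per-i count and A's per-window count
lemma countP_shift (f : Nat → Bool) (c : Nat) (hc : 1 ≤ c) :
    ∀ n : Nat, (List.range (c + n)).countP (fun i => decide (c ≤ i + 1) && f (i + 1 - c))
      = (List.range (n + 1)).countP f := by
  intro n
  induction n with
  | zero =>
    rw [Nat.add_zero]
    obtain ⟨c', rfl⟩ : ∃ c', c = c' + 1 := ⟨c - 1, by omega⟩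
    rw [List.range_succ, List.countP_append]
    have h0 : (List.range c').countP (fun i => decide (c' + 1 ≤ i + 1) && f (i + 1 - (c' + 1))) = 0 := by
      rw [List.countP_eq_zero]
      intro i hi
      rw [List.mem_range] at hi
      simp only [Bool.and_eq_true, decide_eq_true_eq]
      intro h
      omega
    rw [h0]
    have h1 : (decide (c' + 1 ≤ c' + 1) && f (c' + 1 - (c' + 1))) = f 0 := by
      simp
    simp [h1, List.countP_cons]
  | succ n ihn =>
    have hca : c + (n + 1) = (c + n) + 1 := by omega
    rw [hca, List.range_succ, List.countP_append, ihn]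
    have h2 : (List.countP (fun i => decide (c ≤ i + 1) && f (i + 1 - c)) [c + n])
        = List.countP f [n + 1] := by
      have h3 : c + n + 1 - c = n + 1 := by omega
      have h4 : c ≤ c + n + 1 := by omega
      simp [List.countP_cons, h3, h4]
    rw [h2, ← List.countP_append, ← List.range_succ]

lemma stepIn_snd_le (st : PySem.Dict String Int × Int) (a : String) :
    st.2 ≤ (stepIn st a).2 := by
  unfold stepIn
  split_ifs
  · simp
  · exact le_refl _

lemma innerA_nonneg (want : List String) (number : List Int) (w : List String) :
    0 ≤ (w.foldl stepIn (dicWN want number, 0)).2 := by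
  suffices h : ∀ st : PySem.Dict String Int × Int, st.2 ≤ (w.foldl stepIn st).2 by
    exact h (dicWN want number, 0)
  induction w with
  | nil => intro st; exact le_refl _
  | cons a t ih =>
    intro st
    rw [List.foldl_cons]
    exact le_trans (stepIn_snd_le st a) (ih (stepIn st a))

lemma stepA_snd_neg (want : List String) (number : List Int) (discount : List String)
    (hneg : number.sum < 0) (st : List String × Int) (i : Int) :
    (stepA want number discount st i).2 = st.2 := by
  have key : ∀ w : List String,
      ¬ ((w.foldl (fun (q : PySem.Dict String Int × Int) item =>
          if q.1.getD item 0 > 0 then (q.1.insert item (q.1.getD item 0 - 1), q.2 + 1)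
          else q)
        ((want.zip number).foldl (fun d p => d.insert p.1 p.2) PySem.Dict.empty, 0)).2
        = number.sum) := by
    intro w hw
    have hnn : 0 ≤ (w.foldl stepIn (dicWN want number, 0)).2 := innerA_nonneg want number w
    have he : (w.foldl (fun (q : PySem.Dict String Int × Int) item =>
          if q.1.getD item 0 > 0 then (q.1.insert item (q.1.getD item 0 - 1), q.2 + 1)
          else q)
        ((want.zip number).foldl (fun d p => d.insert p.1 p.2) PySem.Dict.empty, 0)).2
        = (w.foldl stepIn (dicWN want number, 0)).2 := rfl
    rw [he] at hw
    omega
  simp only [stepA]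
  split_ifs
  all_goals first
    | rfl
    | (exact absurd (by assumption) (key _))

lemma foldA_neg (want : List String) (number : List Int) (discount : List String)
    (hneg : number.sum < 0) :
    ∀ (l : List Int) (st : List String × Int),
      (l.foldl (stepA want number discount) st).2 = st.2 := by
  intro l
  induction l with
  | nil => intro st; rfl
  | cons i t ih =>
    intro st
    rw [List.foldl_cons, ih, stepA_snd_neg want number discount hneg]

theorem solution_spec : Claim_equal_solution := by
  unfold Claim_equal_solution
  intro want number discount _ hpre
  obtain ⟨hsumne, -⟩ := hpre
  unfold Spec_solution
  have hlenD : PySem.List.len discount = (discount.length : Int) := PySem.List.len_eq discount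
  rw [solution_eq, solution_alt_eq, hlenD]
  by_cases hneg : number.sum < 0
  case pos =>
    rw [if_pos (Or.inl (by omega))]
    exact foldA_neg want number discount hneg _ _
  case neg =>
  have hsum1 : 1 ≤ number.sum := by omega
  have hk0 : 0 ≤ number.sum := by omega
  set kN : Nat := number.sum.toNat with hkN
  have hsum : number.sum = (kN : Int) := (Int.toNat_of_nonneg hk0).symm
  have hk1 : 1 ≤ kN := by omega
  by_cases hL : (discount.length : Int) < number.sum
  · rw [if_pos (Or.inr hL)]
    have hnil : PySem.List.pyRange 0 ((discount.length : Int) - number.sum + 1) 1 = [] :=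
      PySem.List.pyRange_one_eq_nil (by omega)
    rw [hnil]
    simp
  · push_neg at hL
    have hkL : kN ≤ discount.length := by omega
    rw [if_neg (by push_cast; omega)]
    set T : Nat := discount.length - kN with hT
    have hTL : kN + T = discount.length := by omega
    have hrangeA : (discount.length : Int) - number.sum + 1 = ((T : Int) + 1) := by
      rw [hsum]; push_cast; omega
    rw [hrangeA]
    have h0 : (((0 : Nat)) : Int) = (0 : Int) := rfl
    have hA := loopA want number discount kN T hk1 hsum hTL (T + 1) 0 (by omega) [] 0
      (Or.inl ⟨rfl, rfl⟩)
    rw [h0] at hA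
    rw [hA]
    have hwin0 : ((discount.take 0).drop (0 - kN)) = ([] : List String) := by simp
    have hB := loopB want number discount kN hk1 hsum hkL discount.length 0 (by omega)
      PySem.Dict.empty 0 0
      (fun z => by rw [hwin0]; simp [PySem.Dict.getD_empty])
      (by rw [hwin0]; simp [badOf])
    rw [h0] at hB
    rw [hB]
    simp only [zero_add]
    congr 1
    have hconv1 : (PySem.List.pyRange 0 ((T : Int) + 1) 1).countP
        (fun j => goodW want number (winAt discount kN j.toNat))
        = (List.range (T + 1)).countP (fun j => goodW want number (winAt discount kN j)) := by
      rw [PySem.List.pyRange_one, List.countP_map]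
      have hTn : (((T : Int) + 1) - 0).toNat = T + 1 := by omega
      rw [hTn]
      apply List.countP_congr
      intro k _
      simp
    have hconv2 : (PySem.List.pyRange 0 ((discount.length : Int)) 1).countP
        (fun i => decide (kN ≤ i.toNat + 1)
          && goodW want number (winAt discount kN (i.toNat + 1 - kN)))
        = (List.range discount.length).countP
          (fun i => decide (kN ≤ i + 1)
            && goodW want number (winAt discount kN (i + 1 - kN))) := by
      rw [PySem.List.pyRange_one, List.countP_map]
      have hLn : (((discount.length : Int)) - 0).toNat = discount.length := by omega
      rw [hLn]
      apply List.countP_congr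
      intro k _
      simp
    rw [hconv1, hconv2, ← hTL]
    exact (countP_shift (fun j => goodW want number (winAt discount kN j)) kN hk1 T).symm
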